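-- pv_equiv track=rewrite | github.com/EgorYankovsky/Hackaton-Grozny-July-2024 | fullfile.py | remove_unnecessary_vertexes
-- ===== SOURCE A (Python) =====
-- def remove_unnecessary_vertexes(vertexes, w, h):
--     left_up =    [w, h]
--     right_up =   [0, h]
--     right_down = [0, 0]
--     for vertex in vertexes:
--         if left_up[0] ** 2 + left_up[1] ** 2 > vertex[0] ** 2 + vertex[1] ** 2:
--             left_up = vertex
--         if (w - right_up[0]) ** 2 + right_up[1] ** 2 > (w - vertex[0]) ** 2 + vertex[1] ** 2:
--             right_up = vertex
--         if (w - right_down[0]) ** 2 + (h - right_down[1]) ** 2 > (w - vertex[0]) ** 2 + (h - vertex[1]) ** 2: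
--             right_down = vertex
--     return [left_up, right_up, right_down]
-- ===== SOURCE B (Python) =====
-- def remove_unnecessary_vertexes(vertexes, w, h):
--     # Stable sort puts the FIRST key-minimal candidate at index 0, which matches
--     # A's strict-update tie-breaking; the corner sentinel is the first candidate.
--     corners = ([w, h], [0, h], [0, 0])
--     keys = (lambda v: v[0] ** 2 + v[1] ** 2,
--             lambda v: (w - v[0]) ** 2 + v[1] ** 2,
--             lambda v: (w - v[0]) ** 2 + (h - v[1]) ** 2)
--     return [sorted([c] + vertexes, key=k)[0] for c, k in zip(corners, keys)]
-- ===== Notes on version B (the rewrite author's own statement) =====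
-- stated objective: alternative
-- what changed: Replaced A's fused running-minimum loop over three accumulators by sort-then-take-first: for each corner, stably sort the sentinel-prepended candidate list by that corner's squared-distance key and take element 0 (stability reproduces A's first-minimal tie-breaking).
import Mathlib
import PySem

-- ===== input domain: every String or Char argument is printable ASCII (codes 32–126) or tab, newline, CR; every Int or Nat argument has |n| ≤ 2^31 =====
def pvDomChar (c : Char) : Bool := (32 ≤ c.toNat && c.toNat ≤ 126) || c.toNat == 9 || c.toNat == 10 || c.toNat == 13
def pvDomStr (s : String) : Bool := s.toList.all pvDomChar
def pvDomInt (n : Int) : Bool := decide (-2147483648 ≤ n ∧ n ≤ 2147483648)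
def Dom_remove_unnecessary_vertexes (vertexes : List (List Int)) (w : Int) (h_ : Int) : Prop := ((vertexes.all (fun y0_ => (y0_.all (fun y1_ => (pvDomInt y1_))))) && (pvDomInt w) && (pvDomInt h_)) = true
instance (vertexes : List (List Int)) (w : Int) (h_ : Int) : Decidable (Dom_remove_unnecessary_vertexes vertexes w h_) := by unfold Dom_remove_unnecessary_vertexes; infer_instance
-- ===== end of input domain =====

-- B replaces A's fused running-minimum loop by sort-then-take-first: each corner's
-- answer is element 0 of the candidate list stably sorted by that corner's key
-- (objective: alternative; same results, stability matches A's tie-breaking).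


-- ===== PORT A =====
-- Literal port of A: one fold over the vertexes carrying the triple
-- (left_up, right_up, right_down), each updated by its strict '>' comparison.
-- vertex[0]/vertex[1] are read with getD 0; Pre_ restricts to vertices of
-- length ≥ 2, exactly where the Python does not raise IndexError.
def remove_unnecessary_vertexes (vertexes : List (List Int)) (w : Int) (h_ : Int) : List (List Int) :=
  let st := vertexes.foldl
    (fun (st : List Int × List Int × List Int) vertex =>
      let left_up := st.1
      let right_up := st.2.1
      let right_down := st.2.2
      let left_up := if (left_up.getD 0 0) ^ 2 + (left_up.getD 1 0) ^ 2 > (vertex.getD 0 0) ^ 2 + (vertex.getD 1 0) ^ 2 then vertex else left_up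
      let right_up := if (w - right_up.getD 0 0) ^ 2 + (right_up.getD 1 0) ^ 2 > (w - vertex.getD 0 0) ^ 2 + (vertex.getD 1 0) ^ 2 then vertex else right_up
      let right_down := if (w - right_down.getD 0 0) ^ 2 + (h_ - right_down.getD 1 0) ^ 2 > (w - vertex.getD 0 0) ^ 2 + (h_ - vertex.getD 1 0) ^ 2 then vertex else right_down
      (left_up, right_up, right_down))
    ([w, h_], [0, h_], [0, 0])
  [st.1, st.2.1, st.2.2]

-- ===== PORT B =====
-- the squared-distance key of each corner
def ruvKeyLU (v : List Int) : Int := (v.getD 0 0) ^ 2 + (v.getD 1 0) ^ 2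
def ruvKeyRU (w : Int) (v : List Int) : Int := (w - v.getD 0 0) ^ 2 + (v.getD 1 0) ^ 2
def ruvKeyRD (w h_ : Int) (v : List Int) : Int := (w - v.getD 0 0) ^ 2 + (h_ - v.getD 1 0) ^ 2

-- port of B: for each (corner sentinel, key) pair, stably sort the sentinel-prepended
-- candidates by the key and take element 0 (the list is nonempty, so headD [] = [0])
def remove_unnecessary_vertexes_alt (vertexes : List (List Int)) (w : Int) (h_ : Int) : List (List Int) :=
  [(([w, h_] : List Int), ruvKeyLU), (([0, h_] : List Int), ruvKeyRU w), (([0, 0] : List Int), ruvKeyRD w h_)].map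
    (fun ck => (PySem.List.sorted (ck.1 :: vertexes) ck.2).headD [])

-- ===== PRECONDITION & SPEC =====
-- Pre_ excludes exactly the inputs on which the Python A raises IndexError
-- (some vertex with fewer than two coordinates).
def Pre_remove_unnecessary_vertexes (vertexes : List (List Int)) (w : Int) (h_ : Int) : Prop :=
  ∀ v ∈ vertexes, 2 ≤ v.length
instance (vertexes : List (List Int)) (w : Int) (h_ : Int) : Decidable (Pre_remove_unnecessary_vertexes vertexes w h_) := by unfold Pre_remove_unnecessary_vertexes; infer_instance
def pvWitness_remove_unnecessary_vertexes : List (List Int) × Int × Int := ([[1, 2], [3, 1]], 5, 4)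

def Spec_remove_unnecessary_vertexes (vertexes : List (List Int)) (w : Int) (h_ : Int) (out : List (List Int)) : Prop := out = remove_unnecessary_vertexes_alt vertexes w h_
instance (vertexes : List (List Int)) (w : Int) (h_ : Int) (out : List (List Int)) : Decidable (Spec_remove_unnecessary_vertexes vertexes w h_ out) := by unfold Spec_remove_unnecessary_vertexes; infer_instance

-- ===== CLAIM (what is proved, stated in full; the proofs are below) =====
def Claim_equal_remove_unnecessary_vertexes : Prop := ∀ (vertexes : List (List Int)) (w : Int) (h_ : Int), Dom_remove_unnecessary_vertexes vertexes w h_ → Pre_remove_unnecessary_vertexes vertexes w h_ → Spec_remove_unnecessary_vertexes vertexes w h_ (remove_unnecessary_vertexes vertexes w h_)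

-- ===== LEMMAS AND PROOFS =====

-- A's update step for one accumulator: keep the earlier element unless strictly closer
def ruvMinStep (key : List Int → Int) (m x : List Int) : List Int :=
  if key x < key m then x else m

-- A's fused loop is the product of three independent running-minimum folds
theorem ruv_fold_split (w h_ : Int) (vs : List (List Int)) :
    ∀ (lu ru rd : List Int),
      vs.foldl
        (fun (st : List Int × List Int × List Int) vertex =>
          let left_up := st.1
          let right_up := st.2.1
          let right_down := st.2.2
          let left_up := if (left_up.getD 0 0) ^ 2 + (left_up.getD 1 0) ^ 2 > (vertex.getD 0 0) ^ 2 + (vertex.getD 1 0) ^ 2 then vertex else left_up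
          let right_up := if (w - right_up.getD 0 0) ^ 2 + (right_up.getD 1 0) ^ 2 > (w - vertex.getD 0 0) ^ 2 + (vertex.getD 1 0) ^ 2 then vertex else right_up
          let right_down := if (w - right_down.getD 0 0) ^ 2 + (h_ - right_down.getD 1 0) ^ 2 > (w - vertex.getD 0 0) ^ 2 + (h_ - vertex.getD 1 0) ^ 2 then vertex else right_down
          (left_up, right_up, right_down)) (lu, ru, rd)
      = (vs.foldl (ruvMinStep ruvKeyLU) lu,
         vs.foldl (ruvMinStep (ruvKeyRU w)) ru,
         vs.foldl (ruvMinStep (ruvKeyRD w h_)) rd) := by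
  induction vs with
  | nil => intro lu ru rd; rfl
  | cons v t ih =>
    intro lu ru rd
    simp only [List.foldl_cons]
    rw [ih]
    simp [ruvMinStep, ruvKeyLU, ruvKeyRU, ruvKeyRD, gt_iff_lt]

-- head of the insertion-sort fold over a nonempty accumulator = the running first-min:
-- inserting x into m :: t yields a list whose head is `if key x < key m then x else m`
theorem ruv_fold_ins_head (key : List Int → Int) (vs : List (List Int)) :
    ∀ (m : List Int) (t : List (List Int)),
      (vs.foldl (fun acc x => PySem.List.insertBy (fun a b => decide (key a < key b)) x acc) (m :: t)).headD []
      = vs.foldl (ruvMinStep key) m := by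
  induction vs with
  | nil => intro m t; rfl
  | cons v vs ih =>
    intro m t
    simp only [List.foldl_cons, PySem.List.insertBy]
    by_cases h : key v < key m
    · simp only [h, decide_true, if_true]
      rw [ih]
      simp [ruvMinStep, h]
    · simp only [h, decide_false, Bool.false_eq_true, if_false]
      rw [ih]
      simp [ruvMinStep, h]

-- B's sort-then-take-first equals A's running first-min for one corner
theorem ruv_sorted_head (key : List Int → Int) (c : List Int) (vs : List (List Int)) :
    (PySem.List.sorted (c :: vs) key).headD [] = vs.foldl (ruvMinStep key) c := by
  rw [PySem.List.sorted_eq_foldl_insertBy]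
  simp only [List.foldl_cons]
  exact ruv_fold_ins_head key vs c []

-- ===== VERDICT (by name: the statement is the Claim_ definition above) =====
theorem remove_unnecessary_vertexes_spec : Claim_equal_remove_unnecessary_vertexes := by
  intro vertexes w h_ _ _
  unfold Spec_remove_unnecessary_vertexes
  unfold remove_unnecessary_vertexes remove_unnecessary_vertexes_alt
  rw [ruv_fold_split]
  simp only [List.map_cons, List.map_nil, ruv_sorted_head]
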